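-- pv_equiv track=rewrite | github.com/darrondai/advent-of-code | year-2025/day-4/accessible_rolls.py | calc_reachable_rolls
-- ===== SOURCE A (Python) =====
-- def calc_reachable_rolls(paper_rolls: set[tuple[int, int]]) -> int:
--     def is_reachable(row: int, col: int) -> bool:
--         # reachable if number of adjacent rolls < 4
--         adjacent_roll_count = 0
--         DIRECTIONS = (
--             (-1, -1),
--             (-1, 0),
--             (-1, 1),
--             (0, -1),
--             (0, 1),
--             (1, -1),
--             (1, 0),
--             (1, 1),
--         )
--
--         for row_offset, col_offset in DIRECTIONS:
--             if (row + row_offset, col + col_offset) in paper_rolls: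
--                 adjacent_roll_count += 1
--
--         return adjacent_roll_count < 4
--
--     accessible_roll_count = 0
--     for row, col in paper_rolls:
--         if is_reachable(row, col):
--             accessible_roll_count += 1
--
--     return accessible_roll_count
-- ===== SOURCE B (Python) =====
-- _OFFSETS = ((-1, -1), (-1, 0), (-1, 1), (0, -1), (0, 1), (1, -1), (1, 0), (1, 1))
--
--
-- def calc_reachable_rolls(paper_rolls):
--     # Scatter pass: bump a tally at every neighbour cell of every roll.
--     counts = {}
--     for r, c in paper_rolls:
--         for dr, dc in _OFFSETS:
--             key = (r + dr, c + dc)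
--             counts[key] = counts.get(key, 0) + 1
--     # Read pass: a roll is accessible iff fewer than 4 rolls are adjacent to it.
--     return sum(1 for roll in paper_rolls if counts.get(roll, 0) < 4)
-- ===== Notes on version B (the rewrite author's own statement) =====
-- stated objective: alternative
-- what changed: Replaces A's per-roll 8-way membership queries against the set by a scatter pass that accumulates adjacency tallies per neighbour cell in one dict, then a read pass counting rolls whose tally is below 4.
import Mathlib
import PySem

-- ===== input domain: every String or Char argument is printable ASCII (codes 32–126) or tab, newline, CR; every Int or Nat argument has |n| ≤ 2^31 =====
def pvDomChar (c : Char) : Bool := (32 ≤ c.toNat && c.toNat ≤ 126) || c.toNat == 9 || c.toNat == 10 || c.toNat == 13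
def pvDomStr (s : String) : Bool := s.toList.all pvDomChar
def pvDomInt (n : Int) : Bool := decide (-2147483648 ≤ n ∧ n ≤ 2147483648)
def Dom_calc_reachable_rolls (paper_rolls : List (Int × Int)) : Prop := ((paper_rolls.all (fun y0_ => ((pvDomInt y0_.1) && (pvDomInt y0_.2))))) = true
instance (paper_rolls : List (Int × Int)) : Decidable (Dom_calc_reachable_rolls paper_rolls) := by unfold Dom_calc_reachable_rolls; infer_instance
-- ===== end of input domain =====

-- B replaces A's per-roll neighbour-membership queries by one scatter pass into a dict of
-- adjacency tallies followed by one read pass (objective: alternative decomposition, same cost class).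

-- ===== PORT A =====
def pvDirsA : List (Int × Int) :=
  [(-1, -1), (-1, 0), (-1, 1), (0, -1), (0, 1), (1, -1), (1, 0), (1, 1)]

def pvIsReachableA (paper_rolls : List (Int × Int)) (row col : Int) : Bool :=
  let adjacent_roll_count : Int :=
    pvDirsA.foldl
      (fun acc o => if paper_rolls.contains (row + o.1, col + o.2) then acc + 1 else acc) 0
  adjacent_roll_count < 4

def calc_reachable_rolls (paper_rolls : List (Int × Int)) : Int :=
  paper_rolls.foldl
    (fun acc rc => if pvIsReachableA paper_rolls rc.1 rc.2 then acc + 1 else acc) 0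

-- ===== PORT B =====
def pvOffsets : List (Int × Int) :=
  [(-1, -1), (-1, 0), (-1, 1), (0, -1), (0, 1), (1, -1), (1, 0), (1, 1)]

def calc_reachable_rolls_alt (paper_rolls : List (Int × Int)) : Int :=
  let counts : PySem.Dict (Int × Int) Int :=
    paper_rolls.foldl
      (fun d rc =>
        pvOffsets.foldl
          (fun d o =>
            let key := (rc.1 + o.1, rc.2 + o.2)
            d.insert key (d.getD key 0 + 1)) d)
      PySem.Dict.empty
  (paper_rolls.countP (fun roll => counts.getD roll 0 < 4) : Int)

-- ===== PRECONDITION & SPEC =====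
-- The Python parameter is a set, so its List encoding holds distinct elements; Pre_ states exactly that.
def Pre_calc_reachable_rolls (paper_rolls : List (Int × Int)) : Prop := paper_rolls.Nodup
instance (paper_rolls : List (Int × Int)) : Decidable (Pre_calc_reachable_rolls paper_rolls) := by
  unfold Pre_calc_reachable_rolls; infer_instance

def pvWitness_calc_reachable_rolls : (List (Int × Int)) := [(0, 0), (5, 5)]

def Spec_calc_reachable_rolls (paper_rolls : List (Int × Int)) (out : Int) : Prop := out = calc_reachable_rolls_alt paper_rolls
instance (paper_rolls : List (Int × Int)) (out : Int) : Decidable (Spec_calc_reachable_rolls paper_rolls out) := by unfold Spec_calc_reachable_rolls; infer_instance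

-- ===== CLAIM (what is proved, stated in full; the proofs are below) =====
def Claim_equal_calc_reachable_rolls : Prop := ∀ (paper_rolls : List (Int × Int)), Dom_calc_reachable_rolls paper_rolls → Pre_calc_reachable_rolls paper_rolls → Spec_calc_reachable_rolls paper_rolls (calc_reachable_rolls paper_rolls)

-- ===== LEMMAS AND PROOFS =====

-- the 8 neighbour cells of a roll, as B scatters them
def pvNbrs (rc : Int × Int) : List (Int × Int) :=
  pvOffsets.map (fun o => (rc.1 + o.1, rc.2 + o.2))

-- multiset identity of the scatter pass: occurrences of p among all scattered neighbours,
-- per source offset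
theorem scatter_count (xs : List (Int × Int)) (p : Int × Int) :
    (xs.flatMap pvNbrs).count p
      = (pvOffsets.map (fun o => xs.count (p.1 - o.1, p.2 - o.2))).sum := by
  obtain ⟨p1, p2⟩ := p
  induction xs with
  | nil => rfl
  | cons rc xs ih =>
      obtain ⟨r1, r2⟩ := rc
      rw [List.flatMap_cons, List.count_append, ih]
      simp only [pvNbrs, pvOffsets, List.map_cons, List.map_nil, List.count_cons,
        List.count_nil, List.sum_cons, List.sum_nil, beq_iff_eq, Prod.mk.injEq,
        eq_sub_iff_add_eq]
      omega

theorem count_nodup (xs : List (Int × Int)) (h : xs.Nodup) (q : Int × Int) :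
    xs.count q = if xs.contains q then 1 else 0 := by
  by_cases hq : q ∈ xs
  · simp [List.count_eq_one_of_mem h hq, hq]
  · simp [List.count_eq_zero_of_not_mem hq, hq]

-- B's tally dict looked up at p equals the number of scattered neighbour hits at p
theorem counts_getD (xs : List (Int × Int)) (d : PySem.Dict (Int × Int) Int) (p : Int × Int) :
    (xs.foldl
      (fun d rc =>
        pvOffsets.foldl
          (fun d o =>
            let key := (rc.1 + o.1, rc.2 + o.2)
            d.insert key (d.getD key 0 + 1)) d) d).getD p 0
      = d.getD p 0 + ((xs.flatMap pvNbrs).count p : Int) := by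
  induction xs generalizing d with
  | nil => simp
  | cons rc xs ih =>
      rw [List.foldl_cons, ih]
      have hmap :
          pvOffsets.foldl
            (fun d o =>
              let key := (rc.1 + o.1, rc.2 + o.2)
              d.insert key (d.getD key 0 + 1)) d
            = (pvOffsets.map (fun o => (rc.1 + o.1, rc.2 + o.2))).foldl
                (fun d k => d.insert k (d.getD k 0 + 1)) d := by
        rw [List.foldl_map]
      rw [hmap, PySem.Dict.getD_foldl_insert_add_one, List.flatMap_cons, List.count_append,
        pvNbrs]
      push_cast
      ring

-- pointwise: A's adjacency count for a roll equals the scatter count at it (offsets are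
-- symmetric under negation; needs nodup, i.e. the set encoding)
theorem adj_eq (xs : List (Int × Int)) (h : xs.Nodup) (p : Int × Int) :
    pvDirsA.foldl
        (fun acc o => if xs.contains (p.1 + o.1, p.2 + o.2) then acc + 1 else acc) (0 : Int)
      = ((xs.flatMap pvNbrs).count p : Int) := by
  rw [PySem.List.foldl_if_add_one, scatter_count]
  simp only [pvDirsA, pvOffsets, List.map_cons, List.map_nil, List.sum_cons, List.sum_nil,
    List.countP_cons, List.countP_nil, count_nodup xs h]
  push_cast
  ring_nf

-- ===== VERDICT (by name: the statement is the Claim_ definition above) =====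
set_option maxHeartbeats 1000000 in
theorem calc_reachable_rolls_spec : Claim_equal_calc_reachable_rolls := by
  intro xs _hdom hpre
  show calc_reachable_rolls xs = calc_reachable_rolls_alt xs
  simp only [calc_reachable_rolls, calc_reachable_rolls_alt]
  rw [PySem.List.foldl_if_add_one, zero_add]
  congr 1
  apply List.countP_congr
  intro roll _hmem
  rw [counts_getD xs PySem.Dict.empty roll, PySem.Dict.getD_empty, zero_add]
  simp only [pvIsReachableA]
  rw [adj_eq xs hpre roll]
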